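-- pv_equiv track=rewrite | github.com/pocsaiangela/Alga1 | Rekurzio/feladat.py | create_palindrome_recursive
-- ===== SOURCE A (Python) =====
-- def build_palindrome(chars, left_half, middle_char):
--     if not chars:
--         return left_half + middle_char + left_half[::-1]
--
--     char, count = chars.popitem()
--
--     if count % 2 == 1:
--         middle_char = char
--         count -= 1
--
--     left_half += char * (count // 2)
--
--     return build_palindrome(chars, left_half, middle_char)
--
-- def create_palindrome_recursive(s):
--     char_count = {}
--     for char in s:
--         char = char.upper()
--         if char in char_count.keys():
--             char_count[char] += 1
--         else:
--             char_count[char] = 1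
--
--     odd_count = 0
--     for count in char_count.values():
--         if count % 2 != 0:
--             odd_count += 1
--
--     if odd_count > 1:
--         return "NO SOLUTION"
--
--     return build_palindrome(char_count, "", "")
-- ===== SOURCE B (Python) =====
-- def create_palindrome_recursive(s):
--     counts = {}
--     for ch in s:
--         c = ch.upper()
--         counts[c] = counts.get(c, 0) + 1
--     odds = [c for c, n in counts.items() if n % 2 != 0]
--     if len(odds) > 1:
--         return "NO SOLUTION"
--     half = "".join(c * (n // 2) for c, n in reversed(list(counts.items())))
--     middle = odds[0] if odds else ""
--     return half + middle + half[::-1]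
-- ===== Notes on version B (the rewrite author's own statement) =====
-- stated objective: simpler
-- what changed: Replaces the recursive popitem-driven accumulator build with a direct pipeline: one counting pass, a filter for odd-count characters, and a single join over the reversed items to form the half string.
import Mathlib
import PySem

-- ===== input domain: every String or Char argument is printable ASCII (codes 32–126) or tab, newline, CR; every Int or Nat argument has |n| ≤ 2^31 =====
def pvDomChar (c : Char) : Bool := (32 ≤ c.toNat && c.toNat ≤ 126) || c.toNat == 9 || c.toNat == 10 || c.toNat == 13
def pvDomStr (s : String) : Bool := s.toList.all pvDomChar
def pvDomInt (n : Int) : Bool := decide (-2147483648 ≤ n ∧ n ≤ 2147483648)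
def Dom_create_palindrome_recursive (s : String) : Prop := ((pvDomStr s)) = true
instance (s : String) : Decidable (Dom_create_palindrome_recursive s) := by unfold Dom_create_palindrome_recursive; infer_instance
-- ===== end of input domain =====

-- B replaces A's recursion over dict.popitem by a single join over the reversed items plus a
-- direct filter for the odd-count character (objective: simpler; equivalence of return values).

-- ===== PORT A =====
-- build_palindrome: chars.popitem() pops the LAST item, so the recursion walks the items
-- list from the right (getLast / dropLast). Strings are carried as List Char (exact for
-- concatenation, repetition and [::-1]); 'char * count' is List.replicate (count.toNat)
-- (counts here are nonnegative; Python's '' on negative repeat = toNat clamp).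
def build_palindrome (chars : List (Char × Int)) (left_half middle_char : List Char) : List Char :=
  if h : chars = [] then left_half ++ middle_char ++ left_half.reverse
  else
    let cc := chars.getLast h
    let char := cc.1
    let count0 := cc.2
    let mc := if PySem.Int.mod count0 2 = 1 then [char] else middle_char
    let count := if PySem.Int.mod count0 2 = 1 then count0 - 1 else count0
    let left_half' := left_half ++ List.replicate (PySem.Int.floordiv count 2).toNat char
    build_palindrome chars.dropLast left_half' mc
termination_by chars.length
decreasing_by
  simp [List.length_dropLast]
  have := List.length_pos_of_ne_nil h
  omega

def create_palindrome_recursive (s : String) : String :=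
  let char_count := s.toList.foldl (fun d ch =>
      if d.contains (PySem.Chars.upperChar ch)
      then d.insert (PySem.Chars.upperChar ch) (d.getD (PySem.Chars.upperChar ch) 0 + 1)
      else d.insert (PySem.Chars.upperChar ch) 1)
    PySem.Dict.empty
  let odd_count := char_count.values.foldl
      (fun acc count => if PySem.Int.mod count 2 ≠ 0 then acc + 1 else acc) (0 : Int)
  if odd_count > 1 then "NO SOLUTION"
  else String.ofList (build_palindrome char_count.items [] [])

-- ===== PORT B =====
def create_palindrome_recursive_alt (s : String) : String :=
  let counts := s.toList.foldl (fun d ch =>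
      d.insert (PySem.Chars.upperChar ch) (d.getD (PySem.Chars.upperChar ch) 0 + 1))
    PySem.Dict.empty
  let odds := (counts.items.filter (fun p => decide (PySem.Int.mod p.2 2 = 1))).map (·.1)
  if odds.length > 1 then "NO SOLUTION"
  else
    let half := counts.items.reverse.flatMap
      (fun p => List.replicate (PySem.Int.floordiv p.2 2).toNat p.1)
    let middle := odds.take 1
    String.ofList (half ++ middle ++ half.reverse)

-- ===== PRECONDITION & SPEC =====
def Spec_create_palindrome_recursive (s : String) (out : String) : Prop := out = create_palindrome_recursive_alt s
instance (s : String) (out : String) : Decidable (Spec_create_palindrome_recursive s out) := by unfold Spec_create_palindrome_recursive; infer_instance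

-- ===== CLAIM (what is proved, stated in full; the proofs are below) =====
def Claim_equal_create_palindrome_recursive : Prop := ∀ (s : String), Dom_create_palindrome_recursive s → Spec_create_palindrome_recursive s (create_palindrome_recursive s)

-- ===== LEMMAS AND PROOFS =====

-- B's half string, as a function of the items list
def pvHalf (items : List (Char × Int)) : List Char :=
  items.reverse.flatMap (fun p => List.replicate (PySem.Int.floordiv p.2 2).toNat p.1)

-- the middle character A's recursion ends with
def pvMid (items : List (Char × Int)) (mid : List Char) : List Char :=
  match items.filter (fun p => decide (PySem.Int.mod p.2 2 = 1)) with
  | [] => mid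
  | p :: _ => [p.1]

theorem pv_floordiv_pred (n : Int) (h : PySem.Int.mod n 2 = 1) :
    PySem.Int.floordiv (n - 1) 2 = PySem.Int.floordiv n 2 := by
  have h2 := PySem.Int.floordiv_mul_add_mod n 2
  rw [PySem.Int.floordiv_eq_iff_of_pos (by norm_num)]
  omega

theorem pv_build_eq (items : List (Char × Int)) (left mid : List Char) :
    build_palindrome items left mid
      = (left ++ pvHalf items) ++ pvMid items mid ++ (left ++ pvHalf items).reverse := by
  induction items using List.reverseRecOn generalizing left mid with
  | nil => simp [build_palindrome, pvHalf, pvMid]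
  | append_singleton items a ih =>
    rw [build_palindrome]
    have hne : items ++ [a] ≠ [] := by simp
    simp only [dif_neg hne, List.getLast_append, List.isEmpty_cons, Bool.false_eq_true,
      dite_false, List.getLast_singleton, List.dropLast_concat]
    rw [ih]
    have hhalf : pvHalf (items ++ [a])
        = List.replicate (PySem.Int.floordiv a.2 2).toNat a.1 ++ pvHalf items := by
      simp [pvHalf]
    by_cases hodd : PySem.Int.mod a.2 2 = 1
    · simp only [if_pos hodd]
      rw [pv_floordiv_pred a.2 hodd, hhalf]
      have hmid : pvMid (items ++ [a]) mid = pvMid items [a.1] := by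
        simp only [pvMid, List.filter_append, List.filter_cons, List.filter_nil]
        simp only [hodd]
        cases items.filter (fun p => decide (PySem.Int.mod p.2 2 = 1)) <;> simp
      rw [hmid]
      simp
    · simp only [if_neg hodd]
      rw [hhalf]
      have hmid : pvMid (items ++ [a]) mid = pvMid items mid := by
        have hdec : decide (PySem.Int.mod a.2 2 = 1) = false := decide_eq_false hodd
        simp only [pvMid, List.filter_append, List.filter_cons, List.filter_nil, hdec,
          Bool.false_eq_true, if_false, List.append_nil]
      rw [hmid]
      simp

-- both counting loops build the same dict: when c is absent, getD c 0 + 1 = 1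
theorem pv_count_eq (l : List Char) :
    l.foldl (fun (d : PySem.Dict Char Int) ch =>
        if d.contains (PySem.Chars.upperChar ch)
        then d.insert (PySem.Chars.upperChar ch) (d.getD (PySem.Chars.upperChar ch) 0 + 1)
        else d.insert (PySem.Chars.upperChar ch) 1)
      PySem.Dict.empty
    = l.foldl (fun (d : PySem.Dict Char Int) ch =>
        d.insert (PySem.Chars.upperChar ch) (d.getD (PySem.Chars.upperChar ch) 0 + 1))
      PySem.Dict.empty := by
  have hf : (fun (d : PySem.Dict Char Int) ch =>
        if d.contains (PySem.Chars.upperChar ch)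
        then d.insert (PySem.Chars.upperChar ch) (d.getD (PySem.Chars.upperChar ch) 0 + 1)
        else d.insert (PySem.Chars.upperChar ch) 1)
      = (fun d ch =>
        d.insert (PySem.Chars.upperChar ch) (d.getD (PySem.Chars.upperChar ch) 0 + 1)) := by
    funext d ch
    by_cases h : d.contains (PySem.Chars.upperChar ch)
    · simp [h]
    · simp only [eq_false_of_ne_true h]
      rw [PySem.Dict.getD_of_not_contains d 0 (eq_false_of_ne_true h)]
      simp
  rw [hf]

-- the middle A ends with (empty initial middle) is B's odds[:1]
theorem pv_mid_take (items : List (Char × Int)) :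
    pvMid items []
      = ((items.filter (fun p => decide (PySem.Int.mod p.2 2 = 1))).map (·.1)).take 1 := by
  unfold pvMid
  cases items.filter (fun p => decide (PySem.Int.mod p.2 2 = 1)) <;> simp

theorem pv_main (d : PySem.Dict Char Int) :
    (if List.foldl (fun acc count => if PySem.Int.mod count 2 ≠ 0 then acc + 1 else acc)
          (0 : Int) d.values > 1
     then "NO SOLUTION" else String.ofList (build_palindrome d.items [] []))
    = (if (List.map (fun x => x.1)
            (List.filter (fun p => decide (PySem.Int.mod p.2 2 = 1)) d.items)).length > 1
       then "NO SOLUTION"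
       else String.ofList
         (d.items.reverse.flatMap (fun p => List.replicate (PySem.Int.floordiv p.2 2).toNat p.1)
          ++ (List.map (fun x => x.1)
               (List.filter (fun p => decide (PySem.Int.mod p.2 2 = 1)) d.items)).take 1
          ++ (d.items.reverse.flatMap
               (fun p => List.replicate (PySem.Int.floordiv p.2 2).toNat p.1)).reverse)) := by
  have hcnt : List.foldl
      (fun acc count => if PySem.Int.mod count 2 ≠ 0 then acc + 1 else acc) (0 : Int) d.values
      = ((d.items.filter (fun p => decide (PySem.Int.mod p.2 2 = 1))).map (·.1)).length := by
    have hfa : (fun (acc : Int) (count : Int) =>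
          if PySem.Int.mod count 2 ≠ 0 then acc + 1 else acc)
        = (fun (acc : Int) (count : Int) =>
            if (decide (PySem.Int.mod count 2 = 1)) = true then acc + 1 else acc) := by
      funext acc n
      rcases PySem.Int.mod_two_eq n with h | h <;> rw [h] <;> simp
    have h2 := PySem.List.foldl_count_if
      (fun (count : Int) => decide (PySem.Int.mod count 2 = 1)) d.values 0
    rw [hfa, h2]
    have hv : d.values = d.items.map (·.2) := rfl
    rw [hv, List.countP_map]
    rw [List.length_map, ← List.countP_eq_length_filter]
    simp only [zero_add, Function.comp_def]
  rw [hcnt]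
  by_cases hgt :
    ((d.items.filter (fun p => decide (PySem.Int.mod p.2 2 = 1))).map (·.1)).length > 1
  · have hgtI :
        ((((d.items.filter (fun p => decide (PySem.Int.mod p.2 2 = 1))).map (·.1)).length : Int)) > 1 := by
      exact_mod_cast hgt
    rw [if_pos hgtI, if_pos hgt]
  · have hgtI :
        ¬ ((((d.items.filter (fun p => decide (PySem.Int.mod p.2 2 = 1))).map (·.1)).length : Int)) > 1 := by
      exact_mod_cast hgt
    rw [if_neg hgtI, if_neg hgt]
    rw [pv_build_eq, pv_mid_take]
    simp [pvHalf]

-- ===== VERDICT (by name: the statement is the Claim_ definition above) =====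
theorem create_palindrome_recursive_spec : Claim_equal_create_palindrome_recursive := by
  intro s _
  unfold Spec_create_palindrome_recursive create_palindrome_recursive create_palindrome_recursive_alt
  rw [pv_count_eq]
  exact pv_main _
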